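-- pv_equiv track=rewrite | github.com/MozartOMaia/carona_amiga | carpool/utils/bits.py | bitsToInteger
-- ===== SOURCE A (Python) =====
-- from typing import Dict
--
-- def bitsToInteger(bits: Dict):
--     bits = bits.values()
--
--     current_value = 1
--     value = 0
--
--     for bit in reversed(bits):
--         if bit == 1:
--             value += current_value
--
--         current_value *= 2
--
--     return value
-- ===== SOURCE B (Python) =====
-- def bitsToInteger(bits):
--     value = 0
--     for bit in bits.values():
--         value = value * 2 + (1 if bit == 1 else 0)
--     return value
-- ===== Notes on version B (the rewrite author's own statement) =====
-- stated objective: simpler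
-- what changed: Replaced the reversed traversal with a separate power-of-two weight accumulator by a forward Horner scan maintaining only the running value (value = value*2 + bit).
import Mathlib
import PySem

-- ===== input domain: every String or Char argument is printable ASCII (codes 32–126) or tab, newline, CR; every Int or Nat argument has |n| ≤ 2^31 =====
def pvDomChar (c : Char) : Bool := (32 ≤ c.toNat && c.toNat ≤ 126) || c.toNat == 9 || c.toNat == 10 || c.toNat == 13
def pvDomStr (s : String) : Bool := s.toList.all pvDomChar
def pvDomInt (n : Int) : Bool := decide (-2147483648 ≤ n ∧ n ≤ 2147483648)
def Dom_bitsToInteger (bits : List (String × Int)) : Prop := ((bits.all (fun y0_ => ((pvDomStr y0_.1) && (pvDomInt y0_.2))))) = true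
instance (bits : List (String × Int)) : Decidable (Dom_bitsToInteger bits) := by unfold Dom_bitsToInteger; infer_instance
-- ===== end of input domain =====

-- B replaces A's reversed traversal with a doubling weight accumulator by a forward Horner scan; objective: simpler.

-- ===== PORT A =====
-- A: iterate over reversed(bits.values()) keeping (current_value, value); return value.
def bitsToInteger (bits : List (String × Int)) : Int :=
  let vals := (PySem.Dict.mk bits).values
  let st := vals.reverse.foldl
    (fun (st : Int × Int) bit =>
      let value := if bit == 1 then st.2 + st.1 else st.2
      (st.1 * 2, value))
    (1, 0)
  st.2

-- ===== PORT B =====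
-- B: forward Horner scan over bits.values().
def bitsToInteger_alt (bits : List (String × Int)) : Int :=
  ((PySem.Dict.mk bits).values).foldl
    (fun value bit => value * 2 + (if bit == 1 then 1 else 0)) 0

-- ===== PRECONDITION & SPEC =====
def Spec_bitsToInteger (bits : List (String × Int)) (out : Int) : Prop := out = bitsToInteger_alt bits
instance (bits : List (String × Int)) (out : Int) : Decidable (Spec_bitsToInteger bits out) := by unfold Spec_bitsToInteger; infer_instance

-- ===== CLAIM (what is proved, stated in full; the proofs are below) =====
def Claim_equal_bitsToInteger : Prop := ∀ (bits : List (String × Int)), Dom_bitsToInteger bits → Spec_bitsToInteger bits (bitsToInteger bits)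

-- ===== LEMMAS AND PROOFS =====

-- little-endian value of a bit list (first element has weight 1)
def pvLE (l : List Int) : Int :=
  match l with
  | [] => 0
  | b :: t => (if b == 1 then 1 else 0) + 2 * pvLE t

theorem pvLE_append_single (l : List Int) (b : Int) :
    pvLE (l ++ [b]) = pvLE l + (if b == 1 then 1 else 0) * 2 ^ l.length := by
  induction l with
  | nil => simp [pvLE]
  | cons x t ih =>
      simp only [List.cons_append, pvLE, ih, List.length_cons, pow_succ]
      split_ifs <;> ring

theorem pvA_foldl (l : List Int) (c v : Int) :
    l.foldl (fun (st : Int × Int) bit =>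
      let value := if bit == 1 then st.2 + st.1 else st.2
      (st.1 * 2, value)) (c, v)
    = (c * 2 ^ l.length, v + c * pvLE l) := by
  induction l generalizing c v with
  | nil => simp [pvLE]
  | cons b t ih =>
      simp only [List.foldl_cons, ih, pvLE, List.length_cons, pow_succ, Prod.mk.injEq]
      constructor
      · ring
      · split <;> ring

theorem pvB_foldl (l : List Int) (a : Int) :
    l.foldl (fun value bit => value * 2 + (if bit == 1 then 1 else 0)) a
    = a * 2 ^ l.length + pvLE l.reverse := by
  induction l generalizing a with
  | nil => simp [pvLE]
  | cons b t ih =>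
      simp only [List.foldl_cons, ih, List.reverse_cons, pvLE_append_single,
        List.length_reverse, List.length_cons, pow_succ]
      ring

-- ===== VERDICT (by name: the statement is the Claim_ definition above) =====
theorem bitsToInteger_spec : Claim_equal_bitsToInteger := by
  intro bits _
  unfold Spec_bitsToInteger bitsToInteger bitsToInteger_alt
  simp only [pvA_foldl, pvB_foldl]
  ring
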